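-- pv_equiv track=rewrite | github.com/taitoushuxingxing/langgraph | examples/05_tool_workflow.py | choose_tool
-- ===== SOURCE A (Python) =====
-- from typing import Literal, TypedDict
--
-- class ToolState(TypedDict):
--     # selected_tool records the routing decision.
--     question: str
--     selected_tool: str
--     tool_result: str
--     final_answer: str
--
-- def choose_tool(state: ToolState) -> dict:
--     question = state["question"].lower()
--
--     if any(word in question for word in ["add", "sum", "plus"]):
--         selected_tool = "calculator"
--     elif "policy" in question or "refund" in question:
--         selected_tool = "faq_lookup"
--     else:
--         selected_tool = "fallback"
--
--     return {"selected_tool": selected_tool}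
-- ===== SOURCE B (Python) =====
-- KEYWORDS = {"add": "calculator", "sum": "calculator", "plus": "calculator",
--             "policy": "faq_lookup", "refund": "faq_lookup"}
-- PRIORITY = {"calculator": 0, "faq_lookup": 1, "fallback": 2}
--
-- def choose_tool(state):
--     question = state["question"].lower()
--     best = "fallback"
--     for i in range(len(question)):
--         for kw, tool in KEYWORDS.items():
--             if question.startswith(kw, i) and PRIORITY[tool] < PRIORITY[best]:
--                 best = tool
--     return {"selected_tool": best}
-- ===== Notes on version B (the rewrite author's own statement) =====
-- stated objective: alternative
-- what changed: Replaces the ordered per-keyword substring searches by a single left-to-right scan over the question's positions that prefix-tests each keyword at every position and keeps the best-priority matched tool in an accumulator.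
import Mathlib
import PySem

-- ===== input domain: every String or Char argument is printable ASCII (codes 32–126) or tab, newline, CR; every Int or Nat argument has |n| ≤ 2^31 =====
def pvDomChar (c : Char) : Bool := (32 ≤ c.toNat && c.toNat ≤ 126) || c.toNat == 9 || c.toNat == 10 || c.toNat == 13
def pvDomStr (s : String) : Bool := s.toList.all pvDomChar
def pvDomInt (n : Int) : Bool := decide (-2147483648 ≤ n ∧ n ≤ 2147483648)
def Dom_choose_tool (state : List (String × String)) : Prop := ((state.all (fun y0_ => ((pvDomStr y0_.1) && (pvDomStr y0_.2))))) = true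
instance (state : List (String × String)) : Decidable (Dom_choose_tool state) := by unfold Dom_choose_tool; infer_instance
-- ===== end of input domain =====

-- B replaces A's ordered per-keyword substring searches by one scan over the question's positions with a best-priority accumulator; same return value.


-- ===== PORT A =====
-- A: state["question"].lower(); if any(word in question for word in ["add","sum","plus"]) → "calculator";
-- elif "policy" in question or "refund" in question → "faq_lookup"; else → "fallback".
def choose_tool (state : List (String × String)) : List (String × String) :=
  match (PySem.Dict.mk state).get? "question" with
  | none => []  -- KeyError: excluded by Pre_choose_tool
  | some q =>
    let question := PySem.Str.lower q
    let selected_tool :=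
      if (["add", "sum", "plus"].any (fun word => PySem.Str.isIn word question)) then
        "calculator"
      else if PySem.Str.isIn "policy" question || PySem.Str.isIn "refund" question then
        "faq_lookup"
      else
        "fallback"
    [("selected_tool", selected_tool)]

-- ===== PORT B =====
def KEYWORDS : List (String × String) :=
  [("add", "calculator"), ("sum", "calculator"), ("plus", "calculator"),
   ("policy", "faq_lookup"), ("refund", "faq_lookup")]

def PRIORITY : List (String × Nat) := [("calculator", 0), ("faq_lookup", 1), ("fallback", 2)]

-- PRIORITY[t]: every tool that reaches the lookup is a key, so the none branch is unreachable
def prioOf (t : String) : Nat := ((PySem.Dict.mk PRIORITY).get? t).getD 0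

-- the inner for-loop body: try every keyword as a prefix at position i, keep the best-priority tool
def scanStep (qs : List Char) (best : String) (i : Nat) : String :=
  KEYWORDS.foldl
    (fun b kt =>
      if PySem.Chars.startswith (qs.drop i) kt.1.toList && decide (prioOf kt.2 < prioOf b)
      then kt.2 else b)
    best

def choose_tool_alt (state : List (String × String)) : List (String × String) :=
  match (PySem.Dict.mk state).get? "question" with
  | none => []  -- KeyError: excluded by Pre_choose_tool
  | some q =>
    let qs := (PySem.Str.lower q).toList
    let best := (List.range qs.length).foldl (scanStep qs) "fallback"
    [("selected_tool", best)]

-- ===== PRECONDITION & SPEC =====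
-- A raises KeyError when the dict has no "question" key; exactly those inputs are excluded.
def Pre_choose_tool (state : List (String × String)) : Prop :=
  (PySem.Dict.mk state).contains "question" = true
instance (state : List (String × String)) : Decidable (Pre_choose_tool state) := by
  unfold Pre_choose_tool; infer_instance

def pvWitness_choose_tool : (List (String × String)) := [("question", "what is 2 plus 2?")]

def Spec_choose_tool (state : List (String × String)) (out : List (String × String)) : Prop := out = choose_tool_alt state
instance (state : List (String × String)) (out : List (String × String)) : Decidable (Spec_choose_tool state out) := by unfold Spec_choose_tool; infer_instance

-- ===== CLAIM (what is proved, stated in full; the proofs are below) =====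
def Claim_equal_choose_tool : Prop := ∀ (state : List (String × String)), Dom_choose_tool state → Pre_choose_tool state → Spec_choose_tool state (choose_tool state)

-- ===== LEMMAS AND PROOFS =====

-- does some calculator keyword start at position i?
def calcAt (qs : List Char) (i : Nat) : Bool :=
  PySem.Chars.startswith (qs.drop i) "add".toList ||
  PySem.Chars.startswith (qs.drop i) "sum".toList ||
  PySem.Chars.startswith (qs.drop i) "plus".toList

def faqAt (qs : List Char) (i : Nat) : Bool :=
  PySem.Chars.startswith (qs.drop i) "policy".toList ||
  PySem.Chars.startswith (qs.drop i) "refund".toList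

theorem scanStep_calc (qs : List Char) (i : Nat) :
    scanStep qs "calculator" i = "calculator" := by
  simp [scanStep, KEYWORDS, prioOf, PRIORITY, PySem.Dict.get?]

theorem scanStep_faq (qs : List Char) (i : Nat) :
    scanStep qs "faq_lookup" i = if calcAt qs i then "calculator" else "faq_lookup" := by
  simp only [scanStep, KEYWORDS, List.foldl, calcAt]
  by_cases h1 : PySem.Chars.startswith (qs.drop i) ['a','d','d'] = true <;>
  by_cases h2 : PySem.Chars.startswith (qs.drop i) ['s','u','m'] = true <;>
  by_cases h3 : PySem.Chars.startswith (qs.drop i) ['p','l','u','s'] = true <;>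
    simp [h1, h2, h3, prioOf, PRIORITY, PySem.Dict.get?]

theorem scanStep_fallback (qs : List Char) (i : Nat) :
    scanStep qs "fallback" i =
      if calcAt qs i then "calculator" else if faqAt qs i then "faq_lookup" else "fallback" := by
  simp only [scanStep, KEYWORDS, List.foldl, calcAt, faqAt]
  by_cases h1 : PySem.Chars.startswith (qs.drop i) ['a','d','d'] = true <;>
  by_cases h2 : PySem.Chars.startswith (qs.drop i) ['s','u','m'] = true <;>
  by_cases h3 : PySem.Chars.startswith (qs.drop i) ['p','l','u','s'] = true <;>
  by_cases h4 : PySem.Chars.startswith (qs.drop i) ['p','o','l','i','c','y'] = true <;>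
  by_cases h5 : PySem.Chars.startswith (qs.drop i) ['r','e','f','u','n','d'] = true <;>
    simp [h1, h2, h3, h4, h5, prioOf, PRIORITY, PySem.Dict.get?]

theorem foldl_scan_calc (qs : List Char) (l : List Nat) :
    l.foldl (scanStep qs) "calculator" = "calculator" := by
  induction l with
  | nil => rfl
  | cons x xs ih => simp [List.foldl, scanStep_calc, ih]

theorem foldl_scan_faq (qs : List Char) (l : List Nat) :
    l.foldl (scanStep qs) "faq_lookup" =
      if l.any (calcAt qs) then "calculator" else "faq_lookup" := by
  induction l with
  | nil => rfl
  | cons x xs ih =>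
    simp only [List.foldl, List.any_cons, scanStep_faq]
    by_cases h : calcAt qs x = true <;> simp [h, foldl_scan_calc, ih]

theorem foldl_scan_fallback (qs : List Char) (l : List Nat) :
    l.foldl (scanStep qs) "fallback" =
      if l.any (calcAt qs) then "calculator"
      else if l.any (faqAt qs) then "faq_lookup" else "fallback" := by
  induction l with
  | nil => rfl
  | cons x xs ih =>
    simp only [List.foldl, List.any_cons, scanStep_fallback]
    by_cases h1 : calcAt qs x = true
    · simp [h1, foldl_scan_calc]
    · by_cases h2 : faqAt qs x = true <;> simp [h1, h2, foldl_scan_faq, ih]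

-- a nonempty keyword occurs somewhere iff it starts at some position i < length
theorem range_any_prefix (qs : List Char) (kw : List Char) (hkw : kw ≠ []) :
    ((List.range qs.length).any fun i => PySem.Chars.startswith (qs.drop i) kw) =
      PySem.Chars.isIn kw qs := by
  rw [Bool.eq_iff_iff, ← PySem.Chars.exists_prefix_drop_iff_isIn]
  simp only [List.any_eq_true, List.mem_range, PySem.Chars.startswith_iff]
  constructor
  · rintro ⟨i, _, hi⟩; exact ⟨i, hi⟩
  · rintro ⟨j, hj⟩
    have hjlt : j < qs.length := by
      by_contra hge
      rw [List.drop_eq_nil_of_le (Nat.le_of_not_lt hge)] at hj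
      exact hkw (List.prefix_nil.mp hj)
    exact ⟨j, hjlt, hj⟩

theorem range_any_calc (qs : List Char) :
    (List.range qs.length).any (calcAt qs) =
      (PySem.Chars.isIn "add".toList qs || PySem.Chars.isIn "sum".toList qs ||
       PySem.Chars.isIn "plus".toList qs) := by
  rw [← range_any_prefix qs "add".toList (by decide),
      ← range_any_prefix qs "sum".toList (by decide),
      ← range_any_prefix qs "plus".toList (by decide),
      Bool.eq_iff_iff]
  simp only [calcAt, List.any_eq_true, List.mem_range, Bool.or_eq_true]
  constructor
  · rintro ⟨i, hi, (h | h) | h⟩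
    · exact Or.inl (Or.inl ⟨i, hi, h⟩)
    · exact Or.inl (Or.inr ⟨i, hi, h⟩)
    · exact Or.inr ⟨i, hi, h⟩
  · rintro ((⟨i, hi, h⟩ | ⟨i, hi, h⟩) | ⟨i, hi, h⟩)
    · exact ⟨i, hi, Or.inl (Or.inl h)⟩
    · exact ⟨i, hi, Or.inl (Or.inr h)⟩
    · exact ⟨i, hi, Or.inr h⟩

theorem range_any_faq (qs : List Char) :
    (List.range qs.length).any (faqAt qs) =
      (PySem.Chars.isIn "policy".toList qs || PySem.Chars.isIn "refund".toList qs) := by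
  rw [← range_any_prefix qs "policy".toList (by decide),
      ← range_any_prefix qs "refund".toList (by decide),
      Bool.eq_iff_iff]
  simp only [faqAt, List.any_eq_true, List.mem_range, Bool.or_eq_true]
  constructor
  · rintro ⟨i, hi, h | h⟩
    · exact Or.inl ⟨i, hi, h⟩
    · exact Or.inr ⟨i, hi, h⟩
  · rintro (⟨i, hi, h⟩ | ⟨i, hi, h⟩)
    · exact ⟨i, hi, Or.inl h⟩
    · exact ⟨i, hi, Or.inr h⟩

-- ===== VERDICT (by name: the statement is the Claim_ definition above) =====
theorem choose_tool_spec : Claim_equal_choose_tool := by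
  intro state _ _
  unfold Spec_choose_tool choose_tool choose_tool_alt
  cases h : (PySem.Dict.mk state).get? "question" with
  | none => rfl
  | some q =>
    simp only [foldl_scan_fallback, range_any_calc, range_any_faq, List.any, Bool.or_false]
    simp [PySem.Str.isIn, or_assoc]
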